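-- pv_equiv track=rewrite | github.com/juneciel510/transient_identification | source_code/plot2.py | detected_points_categories
-- ===== SOURCE A (Python) =====
-- from typing import Callable, Dict, List, Set, Tuple
--
-- def detected_points_categories(breakpoints_detected:List[int],
--                                ground_truth:List[int]):
--     '''
--
--     '''
--
--
--     points_correct=[point for point in breakpoints_detected if point in ground_truth]
--     points_correct.sort()
--     points_faulty=[point for point in breakpoints_detected if point not in ground_truth]
--     points_faulty.sort()
--     points_missed=[point for point in ground_truth if point not in breakpoints_detected]
--     points_missed.sort()
--
--     return points_correct,points_faulty, points_missed
-- ===== SOURCE B (Python) =====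
-- def detected_points_categories(breakpoints_detected, ground_truth):
--     sd = sorted(breakpoints_detected)
--     st = sorted(ground_truth)
--
--     def split(xs, ys):
--         # two-pointer pass: xs, ys sorted; classify each x by presence in ys
--         hit, miss = [], []
--         j = 0
--         for x in xs:
--             while j < len(ys) and ys[j] < x:
--                 j += 1
--             if j < len(ys) and ys[j] == x:
--                 hit.append(x)
--             else:
--                 miss.append(x)
--         return hit, miss
--
--     correct, faulty = split(sd, st)
--     _, missed = split(st, sd)
--     return correct, faulty, missed
-- ===== Notes on version B (the rewrite author's own statement) =====
-- stated objective: faster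
-- what changed: Replaces the three filter-with-linear-membership passes followed by sorts with one sort of each list and two two-pointer merge passes over the sorted lists.
import Mathlib
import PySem

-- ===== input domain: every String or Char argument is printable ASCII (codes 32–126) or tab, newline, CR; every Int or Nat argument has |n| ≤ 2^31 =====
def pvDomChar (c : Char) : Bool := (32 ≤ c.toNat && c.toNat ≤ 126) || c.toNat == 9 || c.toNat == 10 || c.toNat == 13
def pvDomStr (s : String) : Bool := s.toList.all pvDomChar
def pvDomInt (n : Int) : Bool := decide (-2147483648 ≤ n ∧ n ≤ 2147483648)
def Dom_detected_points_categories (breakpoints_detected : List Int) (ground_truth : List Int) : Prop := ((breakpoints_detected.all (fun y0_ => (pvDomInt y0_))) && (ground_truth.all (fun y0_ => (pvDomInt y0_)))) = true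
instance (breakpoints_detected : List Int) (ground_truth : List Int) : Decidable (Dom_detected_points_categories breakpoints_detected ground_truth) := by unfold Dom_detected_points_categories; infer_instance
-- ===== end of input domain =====

-- B sorts each input once and uses two two-pointer merge passes instead of A's filters with linear membership tests; faster.


-- ===== PORT A =====
def detected_points_categories (breakpoints_detected : List Int) (ground_truth : List Int) : List Int × List Int × List Int :=
  let points_correct := breakpoints_detected.filter (fun point => decide (point ∈ ground_truth))
  let points_correct := PySem.List.sorted points_correct (fun x => x) false
  let points_faulty := breakpoints_detected.filter (fun point => decide (point ∉ ground_truth))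
  let points_faulty := PySem.List.sorted points_faulty (fun x => x) false
  let points_missed := ground_truth.filter (fun point => decide (point ∉ breakpoints_detected))
  let points_missed := PySem.List.sorted points_missed (fun x => x) false
  (points_correct, points_faulty, points_missed)

-- ===== PORT B =====
-- two-pointer pass of Source B's `split`; the monotone index j is represented by the remaining suffix ys[j:]
def pvSplitTP : List Int → List Int → List Int × List Int
  | [], _ => ([], [])
  | x :: xs, ys =>
    let ys' := ys.dropWhile (fun y => decide (y < x))
    let r := pvSplitTP xs ys'
    match ys' with
    | y :: _ => if y = x then (x :: r.1, r.2) else (r.1, x :: r.2)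
    | [] => (r.1, x :: r.2)

def detected_points_categories_alt (breakpoints_detected : List Int) (ground_truth : List Int) : List Int × List Int × List Int :=
  let sd := PySem.List.sorted breakpoints_detected (fun x => x) false
  let st := PySem.List.sorted ground_truth (fun x => x) false
  let cf := pvSplitTP sd st
  let m := pvSplitTP st sd
  (cf.1, cf.2, m.2)

-- ===== PRECONDITION & SPEC =====
def Spec_detected_points_categories (breakpoints_detected : List Int) (ground_truth : List Int) (out : List Int × List Int × List Int) : Prop := out = detected_points_categories_alt breakpoints_detected ground_truth
instance (breakpoints_detected : List Int) (ground_truth : List Int) (out : List Int × List Int × List Int) : Decidable (Spec_detected_points_categories breakpoints_detected ground_truth out) := by unfold Spec_detected_points_categories; infer_instance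

-- ===== CLAIM (what is proved, stated in full; the proofs are below) =====
def Claim_equal_detected_points_categories : Prop := ∀ (breakpoints_detected : List Int) (ground_truth : List Int), Dom_detected_points_categories breakpoints_detected ground_truth → Spec_detected_points_categories breakpoints_detected ground_truth (detected_points_categories breakpoints_detected ground_truth)

-- ===== LEMMAS AND PROOFS =====

-- the dropped prefix is entirely below x, so it cannot hide a member z ≥ x
lemma mem_dropWhile_lt_iff (x z : Int) (hxz : x ≤ z) :
    ∀ (ys : List Int), (z ∈ ys.dropWhile (fun y => decide (y < x)) ↔ z ∈ ys) := by
  intro ys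
  induction ys with
  | nil => simp
  | cons y ys ih =>
    by_cases h : y < x
    · simp [h, ih]
      intro hz; omega
    · simp [h]

-- membership of x in a sorted list is decided by the head of the suffix left after dropping everything < x
lemma mem_iff_head_dropWhile (x : Int) (ys : List Int) (hys : ys.Pairwise (· ≤ ·)) :
    (x ∈ ys) ↔ (ys.dropWhile (fun y => decide (y < x))).head? = some x := by
  induction ys with
  | nil => simp
  | cons y ys ih =>
    rcases List.pairwise_cons.mp hys with ⟨hy, hys'⟩
    by_cases h : y < x
    · have hne : x ≠ y := by omega
      simp [h, hne, ih hys']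
    · rw [List.dropWhile_cons, if_neg (by simp [h])]
      simp only [List.head?_cons, Option.some.injEq]
      constructor
      · intro hx
        rcases List.mem_cons.mp hx with heq | hx
        · exact heq.symm
        · have h1 := hy x hx
          omega
      · intro heq
        rw [← heq]
        exact List.mem_cons_self

lemma pvSplitTP_eq (xs : List Int) : ∀ (ys : List Int),
    xs.Pairwise (· ≤ ·) → ys.Pairwise (· ≤ ·) →
    pvSplitTP xs ys = (xs.filter (fun x => decide (x ∈ ys)), xs.filter (fun x => decide (x ∉ ys))) := by
  induction xs with
  | nil => intro ys _ _; rfl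
  | cons x xs ih =>
    intro ys hxs hys
    rcases List.pairwise_cons.mp hxs with ⟨hx, hxs'⟩
    have hys' : (ys.dropWhile (fun y => decide (y < x))).Pairwise (· ≤ ·) :=
      hys.sublist (List.dropWhile_sublist _)
    have hih := ih (ys.dropWhile (fun y => decide (y < x))) hxs' hys'
    have hfilt1 : xs.filter (fun z => decide (z ∈ ys.dropWhile (fun y => decide (y < x))))
        = xs.filter (fun z => decide (z ∈ ys)) := by
      apply List.filter_congr
      intro z hz
      simp [mem_dropWhile_lt_iff x z (hx z hz)]
    have hfilt2 : xs.filter (fun z => decide (z ∉ ys.dropWhile (fun y => decide (y < x))))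
        = xs.filter (fun z => decide (z ∉ ys)) := by
      apply List.filter_congr
      intro z hz
      simp [mem_dropWhile_lt_iff x z (hx z hz)]
    have hmem := mem_iff_head_dropWhile x ys hys
    cases hd : ys.dropWhile (fun y => decide (y < x)) with
    | nil =>
      rw [hd] at hmem hih hfilt1 hfilt2
      have hnotmem : x ∉ ys := by simp [hmem]
      rw [List.filter_cons_of_neg (p := fun z => decide (z ∈ ys)) (by simpa using hnotmem),
          List.filter_cons_of_pos (p := fun z => decide (z ∉ ys)) (by simpa using hnotmem)]
      simp only [pvSplitTP, hd]
      rw [hih]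
      exact Prod.ext (by exact hfilt1) (by rw [hfilt2])
    | cons y t =>
      rw [hd] at hmem hih hfilt1 hfilt2
      simp only [List.head?_cons, Option.some.injEq] at hmem
      by_cases hyx : y = x
      · have hxmem : x ∈ ys := hmem.mpr hyx
        rw [List.filter_cons_of_pos (p := fun z => decide (z ∈ ys)) (by simpa using hxmem),
            List.filter_cons_of_neg (p := fun z => decide (z ∉ ys)) (by simpa using hxmem)]
        simp only [pvSplitTP, hd, if_pos hyx]
        rw [hih]
        exact Prod.ext (by rw [hfilt1]) (by rw [hfilt2])
      · have hnotmem : x ∉ ys := fun hx => hyx (hmem.mp hx)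
        rw [List.filter_cons_of_neg (p := fun z => decide (z ∈ ys)) (by simpa using hnotmem),
            List.filter_cons_of_pos (p := fun z => decide (z ∉ ys)) (by simpa using hnotmem)]
        simp only [pvSplitTP, hd, if_neg hyx]
        rw [hih]
        exact Prod.ext (by rw [hfilt1]) (by rw [hfilt2])

-- sorting commutes with filtering (Int, identity key)
lemma sorted_filter_comm (p : Int → Bool) (l : List Int) :
    PySem.List.sorted (l.filter p) (fun x => x) false
      = (PySem.List.sorted l (fun x => x) false).filter p := by
  apply PySem.List.sorted_id_eq_of_perm_of_pairwise
  · exact ((PySem.List.sorted_perm l (fun x => x) false).filter p)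
  · exact (PySem.List.sorted_pairwise l (fun x => x)).filter p

-- ===== VERDICT (by name: the statement is the Claim_ definition above) =====
theorem detected_points_categories_spec : Claim_equal_detected_points_categories := by
  intro bd gt _
  show detected_points_categories bd gt = detected_points_categories_alt bd gt
  unfold detected_points_categories detected_points_categories_alt
  dsimp only
  have hsd : (PySem.List.sorted bd (fun x => x) false).Pairwise (· ≤ ·) :=
    PySem.List.sorted_pairwise bd (fun x => x)
  have hst : (PySem.List.sorted gt (fun x => x) false).Pairwise (· ≤ ·) :=
    PySem.List.sorted_pairwise gt (fun x => x)
  rw [pvSplitTP_eq _ _ hsd hst, pvSplitTP_eq _ _ hst hsd,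
      sorted_filter_comm, sorted_filter_comm, sorted_filter_comm]
  refine Prod.ext ?_ (Prod.ext ?_ ?_)
  · exact List.filter_congr (fun z _ => by simp [PySem.List.mem_sorted])
  · exact List.filter_congr (fun z _ => by simp [PySem.List.mem_sorted])
  · exact List.filter_congr (fun z _ => by simp [PySem.List.mem_sorted])
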